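-- pv_equiv track=rewrite | github.com/Kamil-IT/WstepDOProgramowaniaPython | Python(DesigningOfAlgorithms)/list8/ex2.py | is_graph_forest
-- ===== SOURCE A (Python) =====
-- from collections import defaultdict
--
-- def is_graph_forest(edges):
--     e = defaultdict(list)
--     for t, f in edges:
--         e[t].append(f)
--         e[f].append(t)
--
--     seen = set()
--
--     def dfs(node, prev):
--         if node in seen:
--             return False
--         seen.add(node)
--         for adj in e[node]:
--             if adj != prev:
--                 if not dfs(adj, node):
--                     return False
--         return True
--
--     for node in e:
--         if node not in seen and not dfs(node, -1):
--             return False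
--
--     return True
-- ===== SOURCE B (Python) =====
-- from collections import defaultdict
--
-- def is_graph_forest(edges):
--     e = defaultdict(list)
--     for t, f in edges:
--         e[t].append(f)
--         e[f].append(t)
--
--     seen = set()
--
--     for start in e:
--         if start in seen:
--             continue
--         stack = [(start, -1)]
--         while stack:
--             node, parent = stack.pop()
--             if node in seen:
--                 return False
--             seen.add(node)
--             # push in reverse so neighbours are popped in adjacency order
--             stack.extend((adj, node) for adj in reversed(e[node]) if adj != parent)
--
--     return True
-- ===== Notes on version B (the rewrite author's own statement) =====
-- stated objective: alternative
-- what changed: replaces the recursive dfs closure with an iterative explicit-stack traversal of (node, parent) pairs, detecting a cycle when a popped node is already seen; no Python recursion (and thus no recursion-depth limit)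
import Mathlib
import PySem

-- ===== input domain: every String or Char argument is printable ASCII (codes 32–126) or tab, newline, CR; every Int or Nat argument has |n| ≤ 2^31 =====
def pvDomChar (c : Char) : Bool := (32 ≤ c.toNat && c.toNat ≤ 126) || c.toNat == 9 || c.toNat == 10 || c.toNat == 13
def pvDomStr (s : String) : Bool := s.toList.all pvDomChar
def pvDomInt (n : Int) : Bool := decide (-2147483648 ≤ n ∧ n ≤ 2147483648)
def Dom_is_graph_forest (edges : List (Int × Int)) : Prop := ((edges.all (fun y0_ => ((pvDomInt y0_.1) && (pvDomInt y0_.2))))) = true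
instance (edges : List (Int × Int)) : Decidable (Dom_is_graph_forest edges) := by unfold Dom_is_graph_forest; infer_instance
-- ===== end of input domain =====

-- B replaces A's recursive dfs closure by an iterative explicit-stack traversal of
-- (node, parent) pairs (objective: alternative decomposition, same asymptotic cost).

-- ===== PORT A =====
-- adjacency defaultdict construction: e[t].append(f); e[f].append(t)
-- (shared helper: B's Python builds the adjacency dict with the identical loop)
def pvBuildAdj (edges : List (Int × Int)) : PySem.Dict Int (List Int) :=
  edges.foldl (fun d tf =>
    let d1 := d.insert tf.1 ((d.getD tf.1 []) ++ [tf.2])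
    d1.insert tf.2 ((d1.getD tf.2 []) ++ [tf.1])) PySem.Dict.empty

-- A's recursive dfs, with fuel (none = fuel exhausted; never happens at the fuel used
-- in is_graph_forest).  Fuel decreases by exactly one per dfs call and the remaining
-- fuel is threaded through; 'min f' f' is fuel bookkeeping only (f' ≤ f always holds,
-- proved in the Sim lemma below), needed for the termination measure.
mutual
def pvDfsA (e : PySem.Dict Int (List Int)) : Nat → Int → Int → PySem.Set Int → Option (Bool × PySem.Set Int × Nat)
  | 0, _, _, _ => none
  | f+1, node, prev, seen =>
    if PySem.Set.contains seen node then some (false, seen, f)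
    else pvDfsCh e (e.getD node []) node prev (PySem.Set.add seen node) f
  termination_by f _ _ _ => (f, 0)

def pvDfsCh (e : PySem.Dict Int (List Int)) : List Int → Int → Int → PySem.Set Int → Nat → Option (Bool × PySem.Set Int × Nat)
  | [], _, _, seen, f => some (true, seen, f)
  | a :: as, node, prev, seen, f =>
    if a = prev then pvDfsCh e as node prev seen f
    else
      match pvDfsA e f a node seen with
      | none => none
      | some (false, s, f') => some (false, s, f')
      | some (true, s, f') => pvDfsCh e as node prev s (min f' f)
  termination_by l _ _ _ f => (f, l.length + 1)
  decreasing_by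
  · exact Prod.Lex.right f (by simp)
  · exact Prod.Lex.right f (by simp)
  · rcases Nat.lt_or_ge (min f' f) f with h | h
    · exact Prod.Lex.left _ _ h
    · have hmin : min f' f = f := by omega
      rw [hmin]; exact Prod.Lex.right f (by simp)
end

-- A's outer loop: for node in e: if node not in seen and not dfs(node, -1): return False
def pvOuterA (e : PySem.Dict Int (List Int)) : List Int → PySem.Set Int → Nat → Option Bool
  | [], _, _ => some true
  | k :: ks, seen, f =>
    if PySem.Set.contains seen k then pvOuterA e ks seen f
    else
      match pvDfsA e f k (-1) seen with
      | none => none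
      | some (false, _, _) => some false
      | some (true, s, f') => pvOuterA e ks s f'

-- fuel 2*|edges|+2 exceeds the number of dfs calls (each call but at most one either
-- adds a fresh node to seen — at most 2*|edges| distinct nodes — or ends the search)
def is_graph_forest (edges : List (Int × Int)) : Bool :=
  let e := pvBuildAdj edges
  match pvOuterA e e.keys PySem.Set.empty (2 * edges.length + 2) with
  | some b => b
  | none => true

-- ===== PORT B =====
-- B's while loop over the explicit stack (head of the list = top of the stack; the
-- Python pushes reversed(e[node]) and pops from the end, which is the same order).
-- Fuel decreases by exactly one per pop; none = fuel exhausted (never at the fuel used).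
def pvLoopB (e : PySem.Dict Int (List Int)) : Nat → List (Int × Int) → PySem.Set Int → Option (Bool × PySem.Set Int × Nat)
  | f, [], seen => some (true, seen, f)
  | 0, _ :: _, _ => none
  | f+1, (node, prev) :: st, seen =>
    if PySem.Set.contains seen node then some (false, seen, f)
    else pvLoopB e f ((((e.getD node []).filter (· ≠ prev)).map (fun a => (a, node))) ++ st)
           (PySem.Set.add seen node)

-- B's outer loop: for start in e: if start in seen: continue; stack = [(start, -1)]; …
def pvOuterB (e : PySem.Dict Int (List Int)) : List Int → PySem.Set Int → Nat → Option Bool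
  | [], _, _ => some true
  | k :: ks, seen, f =>
    if PySem.Set.contains seen k then pvOuterB e ks seen f
    else
      match pvLoopB e f [(k, -1)] seen with
      | none => none
      | some (false, _, _) => some false
      | some (true, s, f') => pvOuterB e ks s f'

def is_graph_forest_alt (edges : List (Int × Int)) : Bool :=
  let e := pvBuildAdj edges
  match pvOuterB e e.keys PySem.Set.empty (2 * edges.length + 2) with
  | some b => b
  | none => true

-- ===== PRECONDITION & SPEC =====
def Spec_is_graph_forest (edges : List (Int × Int)) (out : Bool) : Prop := out = is_graph_forest_alt edges
instance (edges : List (Int × Int)) (out : Bool) : Decidable (Spec_is_graph_forest edges out) := by unfold Spec_is_graph_forest; infer_instance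

-- ===== CLAIM (what is proved, stated in full; the proofs are below) =====
def Claim_equal_is_graph_forest : Prop := ∀ (edges : List (Int × Int)), Dom_is_graph_forest edges → Spec_is_graph_forest edges (is_graph_forest edges)

-- ===== LEMMAS AND PROOFS =====

-- simulation statement at fuel f: one stack pop of B = one dfs call of A, with
-- identical seen set and identical remaining fuel; plus: remaining fuel never grows
def PvSimA (e : PySem.Dict Int (List Int)) (f : Nat) : Prop :=
  ∀ (node prev : Int) (seen : PySem.Set Int) (st : List (Int × Int)),
    (pvLoopB e f ((node, prev) :: st) seen =
      match pvDfsA e f node prev seen with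
      | none => none
      | some (false, s, f') => some (false, s, f')
      | some (true, s, f') => pvLoopB e f' st s)
    ∧ (∀ b s f', pvDfsA e f node prev seen = some (b, s, f') → f' ≤ f)

lemma pvSimCh (e : PySem.Dict Int (List Int)) (F : Nat)
    (hA : ∀ g, g ≤ F → PvSimA e g) :
    ∀ (l : List Int) (f : Nat), f ≤ F → ∀ (node prev : Int) (seen : PySem.Set Int) (st : List (Int × Int)),
    (pvLoopB e f (((l.filter (· ≠ prev)).map (fun a => (a, node))) ++ st) seen =
      match pvDfsCh e l node prev seen f with
      | none => none
      | some (false, s, f') => some (false, s, f')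
      | some (true, s, f') => pvLoopB e f' st s)
    ∧ (∀ b s f', pvDfsCh e l node prev seen f = some (b, s, f') → f' ≤ f) := by
  intro l
  induction l with
  | nil =>
    intro f hf node prev seen st
    refine ⟨?_, ?_⟩
    · simp [pvDfsCh]
    · intro b s f' h
      simp [pvDfsCh] at h
      omega
  | cons a as ih =>
    intro f hf node prev seen st
    by_cases hap : a = prev
    · -- skipped neighbour: no pop on B's side either
      have := ih f hf node prev seen st
      simpa [pvDfsCh, hap] using this
    · have hfilter : ((a :: as).filter (· ≠ prev)).map (fun a => (a, node)) =
          (a, node) :: (as.filter (· ≠ prev)).map (fun a => (a, node)) := by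
        simp [List.filter, hap]
      rw [hfilter]
      have hAf := hA f hf a node seen ((as.filter (· ≠ prev)).map (fun a => (a, node)) ++ st)
      rcases hAf with ⟨hAeq, hAle⟩
      refine ⟨?_, ?_⟩
      · rw [List.cons_append, hAeq]
        cases hcall : pvDfsA e f a node seen with
        | none => simp [pvDfsCh, hap, hcall]
        | some r =>
          obtain ⟨b, s, f'⟩ := r
          cases b with
          | false => simp [pvDfsCh, hap, hcall]
          | true =>
            have hle : f' ≤ f := hAle _ _ _ hcall
            have hmin : min f' f = f' := Nat.min_eq_left hle
            have := ih f' (le_trans hle hf) node prev s st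
            simp only [pvDfsCh, hap, hcall, hmin]
            exact this.1
      · intro b s f' h
        cases hcall : pvDfsA e f a node seen with
        | none => simp [pvDfsCh, hap, hcall] at h
        | some r =>
          obtain ⟨b0, s0, f0⟩ := r
          have hle0 : f0 ≤ f := hAle _ _ _ hcall
          cases b0 with
          | false =>
            simp [pvDfsCh, hap, hcall] at h
            omega
          | true =>
            have hmin : min f0 f = f0 := Nat.min_eq_left hle0
            simp only [pvDfsCh, if_neg hap, hcall, hmin] at h
            have := (ih f0 (le_trans hle0 hf) node prev s0 st).2 _ _ _ h
            omega

lemma pvSimA_all (e : PySem.Dict Int (List Int)) : ∀ f, PvSimA e f := by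
  intro f
  induction f using Nat.strong_induction_on with
  | _ f IH =>
    cases f with
    | zero =>
      intro node prev seen st
      refine ⟨by simp [pvLoopB, pvDfsA], ?_⟩
      intro b s f' h
      simp [pvDfsA] at h
    | succ f =>
      intro node prev seen st
      by_cases hmem : PySem.Set.contains seen node = true
      · refine ⟨?_, ?_⟩
        · simp only [pvLoopB, pvDfsA, if_pos hmem]
        · intro b s f' h
          simp only [pvDfsA, if_pos hmem, Option.some.injEq, Prod.mk.injEq] at h
          omega
      · have hCh := pvSimCh e f (fun g hg => IH g (Nat.lt_succ_of_le hg))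
          (e.getD node []) f (le_refl f) node prev (PySem.Set.add seen node) st
        refine ⟨?_, ?_⟩
        · simp only [pvLoopB, pvDfsA, if_neg hmem]
          exact hCh.1
        · intro b s f' h
          simp only [pvDfsA, if_neg hmem] at h
          have := hCh.2 _ _ _ h
          omega

lemma pvOuter_eq (e : PySem.Dict Int (List Int)) :
    ∀ (ks : List Int) (seen : PySem.Set Int) (f : Nat),
    pvOuterB e ks seen f = pvOuterA e ks seen f := by
  intro ks
  induction ks with
  | nil => intro seen f; rfl
  | cons k ks ih =>
    intro seen f
    by_cases hmem : PySem.Set.contains seen k = true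
    · simp only [pvOuterA, pvOuterB, if_pos hmem]
      exact ih seen f
    · have hsim := (pvSimA_all e f k (-1) seen []).1
      simp only [pvOuterA, pvOuterB, if_neg hmem]
      rw [hsim]
      cases hcall : pvDfsA e f k (-1) seen with
      | none => simp
      | some r =>
        obtain ⟨b, s, f'⟩ := r
        cases b with
        | false => simp
        | true => simp [pvLoopB, ih]

-- ===== VERDICT (by name: the statement is the Claim_ definition above) =====
theorem is_graph_forest_spec : Claim_equal_is_graph_forest := by
  intro edges _
  unfold Spec_is_graph_forest is_graph_forest is_graph_forest_alt
  simp only [pvOuter_eq]
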